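-- pv_equiv track=rewrite | github.com/JoJaJones/leetcode_solutions | FormTeam.py | formTeam
-- ===== SOURCE A (Python) =====
-- def formTeam(d, t, n):
--     dev_arr = [0]*(d-1)
--     test_arr = [0]*(t-1)
--     dev_arr[0] = 1
--     test_arr[0] = 1
--     for i in range(1, n):
--         d_sum = sum(dev_arr) % 1000000007
--         t_sum = sum(test_arr) % 1000000007
--         dev_arr = [t_sum] + dev_arr
--         test_arr = [d_sum] + test_arr
--         dev_arr.pop()
--         test_arr.pop()
--
--     return (sum(dev_arr) + sum(test_arr)) % 1000000007
-- ===== SOURCE B (Python) =====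
-- def formTeam(d, t, n):
--     M = 1000000007
--     # Histories of every value ever held by each array, oldest first: seeded with
--     # the initial window contents ([0,...,0,1]); window sums maintained in O(1).
--     dv = [0] * (d - 1)
--     dv[-1] = 1
--     tv = [0] * (t - 1)
--     tv[-1] = 1
--     sd, st = 1, 1
--     for i in range(1, n):
--         nd = st % M
--         nt = sd % M
--         dv.append(nd)
--         tv.append(nt)
--         sd += nd - dv[i - 1]
--         st += nt - tv[i - 1]
--     return (sd + st) % M
-- ===== Notes on version B (the rewrite author's own statement) =====
-- stated objective: faster
-- what changed: Instead of rebuilding both fixed-size arrays and re-summing them from scratch every iteration, B records each newly generated value in an append-only history list and maintains the two window sums incrementally, adding the new value and subtracting the value that expires (looked up by index in the history), O(1) per step.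
import Mathlib
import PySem

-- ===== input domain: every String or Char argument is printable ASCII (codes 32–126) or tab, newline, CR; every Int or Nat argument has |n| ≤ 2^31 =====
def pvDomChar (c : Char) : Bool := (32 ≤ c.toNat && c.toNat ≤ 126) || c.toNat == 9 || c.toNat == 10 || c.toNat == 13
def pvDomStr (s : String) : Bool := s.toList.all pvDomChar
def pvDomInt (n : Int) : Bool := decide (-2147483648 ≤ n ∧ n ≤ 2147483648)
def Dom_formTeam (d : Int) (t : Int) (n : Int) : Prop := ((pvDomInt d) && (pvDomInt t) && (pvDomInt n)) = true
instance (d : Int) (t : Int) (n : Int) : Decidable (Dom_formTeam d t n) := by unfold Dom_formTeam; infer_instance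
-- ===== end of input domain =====

-- B replaces A's per-iteration list rebuild + full re-summation by an append-only
-- history of array values with incrementally maintained window sums (measured faster; objective: faster).


-- ===== PORT A =====
-- one iteration of A's loop body: re-sum both arrays, prepend, pop the last element
def formTeamStepA (s : List Int × List Int) : List Int × List Int :=
  let d_sum := PySem.Int.mod s.1.sum 1000000007
  let t_sum := PySem.Int.mod s.2.sum 1000000007
  ((t_sum :: s.1).dropLast, (d_sum :: s.2).dropLast)

def formTeam (d : Int) (t : Int) (n : Int) : Int :=
  let dev_arr := (List.replicate (d - 1).toNat (0 : Int)).set 0 1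
  let test_arr := (List.replicate (t - 1).toNat (0 : Int)).set 0 1
  let s := (PySem.List.pyRange 1 n 1).foldl (fun s _ => formTeamStepA s) (dev_arr, test_arr)
  PySem.Int.mod (s.1.sum + s.2.sum) 1000000007

-- ===== PORT B =====
-- one iteration of B's loop at index i: append the newly generated values to the
-- histories and slide each running window sum: add the new value, subtract the one
-- leaving the window, history index i-1 (in range whenever the loop runs inside Pre_)
def formTeamStepB (s : List Int × List Int × Int × Int) (i : Int) :
    List Int × List Int × Int × Int :=
  let nd := PySem.Int.mod s.2.2.2 1000000007
  let nt := PySem.Int.mod s.2.2.1 1000000007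
  let dv := s.1 ++ [nd]
  let tv := s.2.1 ++ [nt]
  let sd := s.2.2.1 + (nd - (PySem.List.pyGet? dv (i - 1)).getD 0)
  let st := s.2.2.2 + (nt - (PySem.List.pyGet? tv (i - 1)).getD 0)
  (dv, tv, sd, st)

def formTeam_alt (d : Int) (t : Int) (n : Int) : Int :=
  let dv := PySem.List.pySetD (List.replicate (d - 1).toNat (0 : Int)) (-1) 1
  let tv := PySem.List.pySetD (List.replicate (t - 1).toNat (0 : Int)) (-1) 1
  let s := (PySem.List.pyRange 1 n 1).foldl formTeamStepB (dv, tv, 1, 1)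
  PySem.Int.mod (s.2.2.1 + s.2.2.2) 1000000007

-- ===== PRECONDITION & SPEC =====
-- A raises IndexError (dev_arr[0] = 1 on an empty list) unless d ≥ 2 and t ≥ 2.
def Pre_formTeam (d : Int) (t : Int) (n : Int) : Prop := 2 ≤ d ∧ 2 ≤ t
instance (d : Int) (t : Int) (n : Int) : Decidable (Pre_formTeam d t n) := by unfold Pre_formTeam; infer_instance
def pvWitness_formTeam : Int × Int × Int := (3, 4, 10)

def Spec_formTeam (d : Int) (t : Int) (n : Int) (out : Int) : Prop := out = formTeam_alt d t n
instance (d : Int) (t : Int) (n : Int) (out : Int) : Decidable (Spec_formTeam d t n out) := by unfold Spec_formTeam; infer_instance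

-- ===== CLAIM (what is proved, stated in full; the proofs are below) =====
def Claim_equal_formTeam : Prop := ∀ (d : Int) (t : Int) (n : Int), Dom_formTeam d t n → Pre_formTeam d t n → Spec_formTeam d t n (formTeam d t n)

-- ===== LEMMAS AND PROOFS =====

-- A's array after the history L of values: the last W history entries, newest first
def window (L : List Int) (W : Nat) : List Int := L.reverse.take W

theorem window_ne_nil (L : List Int) (W : Nat) (hW : 1 ≤ W) (hL : W ≤ L.length) :
    window L W ≠ [] := by
  have hlen : (window L W).length = W := by simp [window, List.length_take]; omega
  intro h; rw [h] at hlen; simp at hlen; omega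

-- prepending the newest value and popping the oldest advances the window by one
theorem window_dropLast (L : List Int) (x : Int) (W : Nat) (hW : 1 ≤ W) (hL : W ≤ L.length) :
    (x :: window L W).dropLast = window (L ++ [x]) W := by
  have hlen : (window L W).length = W := by simp [window, List.length_take]; omega
  rw [List.dropLast_cons_of_ne_nil (window_ne_nil L W hW hL), List.dropLast_eq_take, hlen]
  unfold window
  rw [List.take_take]
  have h2 : (L ++ [x]).reverse = x :: L.reverse := by simp
  rw [h2]
  have h3 : W = (W - 1) + 1 := by omega
  rw [h3, List.take_succ_cons]
  have e1 : min (W - 1 + 1 - 1) (W - 1 + 1) = W - 1 := by omega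
  rw [e1]

-- the value that expires when the window advances
theorem window_last (L : List Int) (W : Nat) (hW : 1 ≤ W) (hL : W ≤ L.length) :
    (window L W).getLastD 0 = L.getD (L.length - W) 0 := by
  have hlen : (window L W).length = W := by simp [window, List.length_take]; omega
  rw [List.getLastD_eq_getLast?, List.getLast?_eq_getElem?, hlen]
  unfold window
  rw [List.getElem?_take_of_lt (by omega)]
  rw [List.getElem?_reverse (by omega)]
  have e : L.length - 1 - (W - 1) = L.length - W := by omega
  rw [e, List.getD_eq_getElem?_getD]

theorem sum_dropLast_ne_nil (l : List Int) (hne : l ≠ []) (x : Int) :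
    ((x :: l).dropLast).sum = x + l.sum - l.getLastD 0 := by
  rw [List.dropLast_cons_of_ne_nil hne, List.sum_cons]
  have h : l.dropLast.sum + l.getLastD 0 = l.sum := by
    conv_rhs => rw [← List.dropLast_concat_getLast hne]
    rw [List.sum_append, List.sum_cons, List.sum_nil,
      List.getLastD_eq_getLast?, List.getLast?_eq_some_getLast hne]
    simp
  linarith

-- running-sum identity for one advance of the window
theorem sum_window_snoc (L : List Int) (x : Int) (W : Nat) (hW : 1 ≤ W) (hL : W ≤ L.length) :
    (window (L ++ [x]) W).sum = (window L W).sum + x - L.getD (L.length - W) 0 := by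
  rw [← window_dropLast L x W hW hL,
    sum_dropLast_ne_nil _ (window_ne_nil L W hW hL) x, window_last L W hW hL]
  ring

-- the seeded history [0,...,0,1] built by B's first two statements
theorem setD_neg_one (W : Nat) (hW : 1 ≤ W) :
    PySem.List.pySetD (List.replicate W (0:Int)) (-1) 1 = List.replicate (W-1) 0 ++ [1] := by
  simp only [PySem.List.pySetD, PySem.List.pySet?, PySem.List.pyIdx?]
  simp only [List.length_replicate]
  rw [if_neg (by omega), if_pos (by omega)]
  simp only [Option.map_some, Option.getD_some]
  have h3 : W = (W - 1) + 1 := by omega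
  rw [h3, List.replicate_succ']
  rw [List.set_append_right _ _ (by simp)]
  simp

-- invariant: B's fold carries the histories of both arrays together with A's current sums
theorem fold_inv (d t n : Int) (hd : 2 ≤ d) (ht : 2 ≤ t) :
    ∀ (k : Nat) (a : Int), (n - a).toNat = k → 1 ≤ a →
    ∀ (dv tv : List Int) (sd st : Int),
    dv.length + 1 = (d - 1).toNat + a.toNat → tv.length + 1 = (t - 1).toNat + a.toNat →
    sd = (window dv (d - 1).toNat).sum → st = (window tv (t - 1).toNat).sum →
    ((PySem.List.pyRange a n 1).foldl formTeamStepB (dv, tv, sd, st)).2.2.1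
      = ((PySem.List.pyRange a n 1).foldl (fun s _ => formTeamStepA s)
          (window dv (d - 1).toNat, window tv (t - 1).toNat)).1.sum
    ∧ ((PySem.List.pyRange a n 1).foldl formTeamStepB (dv, tv, sd, st)).2.2.2
      = ((PySem.List.pyRange a n 1).foldl (fun s _ => formTeamStepA s)
          (window dv (d - 1).toNat, window tv (t - 1).toNat)).2.sum := by
  intro k
  induction k with
  | zero =>
    intro a hk ha dv tv sd st hdvl htvl hsd hst
    have hna : n ≤ a := by omega
    rw [PySem.List.pyRange_one_eq_nil hna]
    exact ⟨hsd, hst⟩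
  | succ k ih =>
    intro a hk ha dv tv sd st hdvl htvl hsd hst
    have hlt : a < n := by omega
    have hW : 1 ≤ (d - 1).toNat := by omega
    have hT : 1 ≤ (t - 1).toNat := by omega
    have hWL : (d - 1).toNat ≤ dv.length := by omega
    have hTL : (t - 1).toNat ≤ tv.length := by omega
    rw [PySem.List.pyRange_one_cons hlt]
    simp only [List.foldl_cons]
    have hstepA : formTeamStepA (window dv (d - 1).toNat, window tv (t - 1).toNat)
        = (window (dv ++ [PySem.Int.mod st 1000000007]) (d - 1).toNat,
           window (tv ++ [PySem.Int.mod sd 1000000007]) (t - 1).toNat) := by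
      simp only [formTeamStepA, hsd, hst]
      rw [window_dropLast dv _ _ hW hWL, window_dropLast tv _ _ hT hTL]
    have hexp : ∀ (L : List Int) (x : Int) (W : Nat), 1 ≤ W → L.length + 1 = W + a.toNat →
        (PySem.List.pyGet? (L ++ [x]) (a - 1)).getD 0 = L.getD (L.length - W) 0 := by
      intro L x W hw hL
      rw [PySem.List.pyGet?_of_nonneg _ (by omega)]
      have hidx : (a - 1).toNat < L.length := by omega
      rw [List.getElem?_append_left hidx]
      have e : (a - 1).toNat = L.length - W := by omega
      rw [e, List.getD_eq_getElem?_getD]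
    have hstepB : formTeamStepB (dv, tv, sd, st) a
        = (dv ++ [PySem.Int.mod st 1000000007], tv ++ [PySem.Int.mod sd 1000000007],
           (window (dv ++ [PySem.Int.mod st 1000000007]) (d - 1).toNat).sum,
           (window (tv ++ [PySem.Int.mod sd 1000000007]) (t - 1).toNat).sum) := by
      simp only [formTeamStepB]
      have hcd : sd + (PySem.Int.mod st 1000000007
            - (PySem.List.pyGet? (dv ++ [PySem.Int.mod st 1000000007]) (a - 1)).getD 0)
          = (window (dv ++ [PySem.Int.mod st 1000000007]) (d - 1).toNat).sum := by
        rw [hexp dv _ (d - 1).toNat hW hdvl, sum_window_snoc dv _ _ hW hWL, hsd]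
        ring
      have hct : st + (PySem.Int.mod sd 1000000007
            - (PySem.List.pyGet? (tv ++ [PySem.Int.mod sd 1000000007]) (a - 1)).getD 0)
          = (window (tv ++ [PySem.Int.mod sd 1000000007]) (t - 1).toNat).sum := by
        rw [hexp tv _ (t - 1).toNat hT htvl, sum_window_snoc tv _ _ hT hTL, hst]
        ring
      rw [hcd, hct]
    rw [hstepA, hstepB]
    exact ih (a + 1) (by omega) (by omega)
      (dv ++ [PySem.Int.mod st 1000000007]) (tv ++ [PySem.Int.mod sd 1000000007]) _ _
      (by simp [List.length_append]; omega) (by simp [List.length_append]; omega) rfl rfl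

-- ===== VERDICT (by name: the statement is the Claim_ definition above) =====
theorem formTeam_spec : Claim_equal_formTeam := by
  intro d t n _ hpre
  obtain ⟨hd, ht⟩ := hpre
  show formTeam d t n = formTeam_alt d t n
  have hseed : ∀ w : Int, 2 ≤ w →
      PySem.List.pySetD (List.replicate (w - 1).toNat (0:Int)) (-1) 1
        = List.replicate ((w - 1).toNat - 1) 0 ++ [1] :=
    fun w hw => setD_neg_one (w - 1).toNat (by omega)
  have hwin : ∀ w : Int, 2 ≤ w →
      (List.replicate (w - 1).toNat (0 : Int)).set 0 1
        = window (List.replicate ((w - 1).toNat - 1) 0 ++ [1]) (w - 1).toNat := by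
    intro w hw
    have h1 : (w - 1).toNat = ((w - 1).toNat - 1) + 1 := by omega
    rw [window, List.reverse_append]
    simp only [List.reverse_replicate, List.reverse_cons, List.reverse_nil, List.nil_append,
      List.singleton_append]
    rw [List.take_of_length_le (by simp; omega)]
    conv_lhs => rw [h1]
    simp [List.replicate_succ]
  have hsum1 : ∀ w : Int, 2 ≤ w →
      (window (List.replicate ((w - 1).toNat - 1) (0:Int) ++ [1]) (w - 1).toNat).sum = 1 := by
    intro w hw
    rw [← hwin w hw]
    have h1 : (w - 1).toNat = ((w - 2).toNat) + 1 := by omega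
    rw [h1]
    simp [List.replicate_succ]
  obtain ⟨h1, h2⟩ := fold_inv d t n hd ht (n - 1).toNat 1 rfl le_rfl
    (List.replicate ((d - 1).toNat - 1) 0 ++ [1]) (List.replicate ((t - 1).toNat - 1) 0 ++ [1])
    1 1 (by simp; omega) (by simp; omega) (hsum1 d hd).symm (hsum1 t ht).symm
  simp only [formTeam, formTeam_alt, hseed d hd, hseed t ht, hwin d hd, hwin t ht, h1, h2]
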